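-- pv_equiv track=rewrite | github.com/donya/PythonKulitta | PTGG.py | lookupLast
-- ===== SOURCE A (Python) =====
-- def lookupLast(env, v):
--     n = len(env)
--     i = n-1
--     while i>=0: # walk backwards through list
--         if (v==env[i][0]): # found a match?
--             return env[i][1]
--         i = i-1
--     raise Exception('No table entry for variable name '+v)
-- ===== SOURCE B (Python) =====
-- def lookupLast(env, v):
--     # single forward pass, overwrite on every match; no early return
--     result = None
--     found = False
--     for key, val in env:
--         if key == v:
--             result = val
--             found = True
--     if found:
--         return result
--     raise Exception('No table entry for variable name '+v)
-- ===== Notes on version B (the rewrite author's own statement) =====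
-- stated objective: alternative
-- what changed: Replaces the backward index walk with early return by a single forward fold that overwrites a result/found accumulator on every matching key and decides only after the loop.
import Mathlib
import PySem

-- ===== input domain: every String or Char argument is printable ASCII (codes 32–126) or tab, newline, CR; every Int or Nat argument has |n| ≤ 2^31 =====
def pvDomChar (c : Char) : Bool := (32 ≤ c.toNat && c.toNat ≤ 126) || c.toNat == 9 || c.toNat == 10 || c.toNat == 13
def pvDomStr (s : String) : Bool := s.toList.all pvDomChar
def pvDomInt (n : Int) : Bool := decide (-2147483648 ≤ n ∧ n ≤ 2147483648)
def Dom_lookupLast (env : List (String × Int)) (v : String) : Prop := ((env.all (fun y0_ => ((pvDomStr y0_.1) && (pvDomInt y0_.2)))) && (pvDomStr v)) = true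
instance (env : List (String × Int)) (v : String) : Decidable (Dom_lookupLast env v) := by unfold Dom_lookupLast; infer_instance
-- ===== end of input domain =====

-- B: single forward fold with an overwrite accumulator instead of A's backward early-return scan; same values, same raise.
-- ===== PORT A =====
-- A walks i from len(env)-1 down to 0, returning at the first match; fuel k stands for i+1.
def lookupLast_go (env : List (String × Int)) (v : String) : Nat → Option Int
  | 0 => none
  | k+1 =>
    match PySem.List.pyGet? env (k : Int) with
    | some p => if v == p.1 then some p.2 else lookupLast_go env v k
    | none => none
def lookupLast (env : List (String × Int)) (v : String) : Int :=
  (lookupLast_go env v env.length).getD 0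

-- ===== PORT B =====
def lookupLast_alt (env : List (String × Int)) (v : String) : Int :=
  ((env.foldl (fun acc p => if p.1 == v then some p.2 else acc) (none : Option Int)).getD 0)

-- ===== PRECONDITION & SPEC =====
-- Pre_ excludes inputs with no entry for v, on which A raises Exception.
def Pre_lookupLast (env : List (String × Int)) (v : String) : Prop :=
  v ∈ env.map Prod.fst
instance (env : List (String × Int)) (v : String) : Decidable (Pre_lookupLast env v) := by
  unfold Pre_lookupLast; infer_instance
def pvWitness_lookupLast : (List (String × Int)) × String := ([("x", 1), ("x", 2)], "x")
def Spec_lookupLast (env : List (String × Int)) (v : String) (out : Int) : Prop := out = lookupLast_alt env v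
instance (env : List (String × Int)) (v : String) (out : Int) : Decidable (Spec_lookupLast env v out) := by unfold Spec_lookupLast; infer_instance

-- ===== CLAIM (what is proved, stated in full; the proofs are below) =====
def Claim_equal_lookupLast : Prop := ∀ (env : List (String × Int)) (v : String), Dom_lookupLast env v → Pre_lookupLast env v → Spec_lookupLast env v (lookupLast env v)

-- ===== LEMMAS AND PROOFS =====
theorem lookupLast_go_eq_foldl (env : List (String × Int)) (v : String) (k : Nat) (hk : k ≤ env.length) :
    lookupLast_go env v k
      = (env.take k).foldl (fun acc p => if p.1 == v then some p.2 else acc) (none : Option Int) := by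
  induction k with
  | zero => simp [lookupLast_go]
  | succ k ih =>
    have hk' : k < env.length := hk
    have htake : env.take (k+1) = env.take k ++ [env[k]] := List.take_succ_eq_append_getElem hk'
    rw [lookupLast_go, PySem.List.pyGet?_natCast, List.getElem?_eq_getElem hk',
        htake, List.foldl_append, ih (Nat.le_of_lt hk')]
    simp only [List.foldl_cons, List.foldl_nil]
    by_cases h : env[k].1 = v
    · simp [h]
    · have h1 : (v == env[k].1) = false := by simp [Ne.symm h]
      have h2 : (env[k].1 == v) = false := by simp [h]
      rw [h1, h2]

-- ===== VERDICT (by name: the statement is the Claim_ definition above) =====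
theorem lookupLast_spec : Claim_equal_lookupLast := by
  intro env v _ _
  unfold Spec_lookupLast lookupLast lookupLast_alt
  rw [lookupLast_go_eq_foldl env v env.length (Nat.le_refl _), List.take_length]
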